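-- pv_equiv track=rewrite | github.com/adusa1019/atcoder | ABC158/D.py | solve
-- ===== SOURCE A (Python) =====
-- def solve(string):
--     s, q, *qs = string.split("\n")
--     pre, post, r = [], [], False
--     for _q in qs[::-1]:
--         if _q == "1":
--             r = not r
--             continue
--         _, f, c = _q.split()
--         if r and f == "2" or not r and f == "1":
--             pre.append(c)
--         else:
--             post.append(c)
--     pre, post = "".join(pre), "".join(post[::-1])
--     return pre + s[::-1] + post if r else pre + s + post
-- ===== SOURCE B (Python) =====
-- def solve(string):
--     s, q, *qs = string.split("\n")
--     total = sum(line == "1" for line in qs)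
--     tagged = []
--     seen = 0
--     for line in qs:
--         if line == "1":
--             seen += 1
--         else:
--             _, f, c = line.split()
--             tagged.append(((f == "1") == ((total - seen) % 2 == 0), c))
--     left = [c for front, c in reversed(tagged) if front]
--     right = [c for front, c in tagged if not front]
--     body = s[::-1] if total % 2 else s
--     return "".join(left) + body + "".join(right)
-- ===== Notes on version B (the rewrite author's own statement) =====
-- stated objective: alternative
-- what changed: A walks the queries backwards maintaining a suffix-flip parity flag and appending into pre/post lists glued around a possibly reversed s; B makes two forward passes: it counts the flips first, tags each inserted character with its final side computed from the remaining flip count, then assembles the answer directly in its final orientation with no conditional result reversal.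
-- outside the precondition, e.g. on solve('ab\n9\n1\n2 3 x\n1'): A returns 'abx', B returns 'xab'; on solve('1'): A raises ValueError, B raises ValueError; on solve('2'): A raises ValueError, B raises ValueError
import Mathlib
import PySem

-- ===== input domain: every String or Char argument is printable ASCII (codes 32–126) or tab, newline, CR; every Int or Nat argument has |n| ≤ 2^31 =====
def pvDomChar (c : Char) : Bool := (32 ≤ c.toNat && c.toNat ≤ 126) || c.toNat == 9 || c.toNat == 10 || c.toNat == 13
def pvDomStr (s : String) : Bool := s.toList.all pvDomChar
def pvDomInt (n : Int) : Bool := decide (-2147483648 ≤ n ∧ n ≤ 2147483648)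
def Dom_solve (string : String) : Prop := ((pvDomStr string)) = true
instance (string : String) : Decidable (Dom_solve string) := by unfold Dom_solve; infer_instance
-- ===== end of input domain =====

-- B replaces A's backward pass with its running orientation flag by two forward passes: count the
-- flips first, then tag each inserted character with its final side computed from the remaining
-- flip count, and assemble the answer in its final orientation (no conditional result reversal);
-- objective: alternative.

-- ===== PORT A =====
-- one loop step of A (state: pre, post, r)
def astep (st : List String × List String × Bool) (q : String) : List String × List String × Bool :=
  if q = "1" then (st.1, st.2.1, !st.2.2)
  else
    match PySem.Str.split₀ q with
    | [_, f, c] =>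
      if (st.2.2 && decide (f = "2")) || (!st.2.2 && decide (f = "1")) then
        (st.1 ++ [c], st.2.1, st.2.2)
      else
        (st.1, st.2.1 ++ [c], st.2.2)
    | _ => st  -- Python raises ValueError (unpacking) here; excluded by Pre_solve

def solve (string : String) : String :=
  match PySem.Str.split? string "\n" with
  | some (s :: _q :: qs) =>
    -- qs[::-1] is qs.reverse
    let st := qs.reverse.foldl astep ([], [], false)
    let pre := PySem.Str.join "" st.1
    let post := PySem.Str.join "" st.2.1.reverse
    -- s[::-1] is String.ofList s.toList.reverse
    if st.2.2 then pre ++ String.ofList s.toList.reverse ++ post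
    else pre ++ s ++ post
  | _ => ""  -- Python raises ValueError (unpacking needs ≥ 2 lines); excluded by Pre_solve

-- ===== PORT B =====
-- one loop step of B (state: tagged, seen); the tag says on which final side the character ends up
def btag (total : Int) (st : List (Bool × String) × Int) (line : String) : List (Bool × String) × Int :=
  if line = "1" then (st.1, st.2 + 1)
  else
    match PySem.Str.split₀ line with
    | [_, f, c] => (st.1 ++ [((f == "1") == decide ((total - st.2) % 2 = 0), c)], st.2)
    | _ => st  -- Python raises ValueError here; excluded by Pre_solve

def solve_alt (string : String) : String :=
  match PySem.Str.split? string "\n" with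
  | none => ""  -- unreachable: the separator "\n" is non-empty
  | some parts =>
    match parts with
    | s :: _q :: qs =>
      let total : Int := ((qs.countP (fun line => line == "1") : Nat) : Int)
      let tagged := (qs.foldl (btag total) ([], 0)).1
      let left := (tagged.reverse.filter (fun p => p.1)).map (fun p => p.2)
      let right := (tagged.filter (fun p => !p.1)).map (fun p => p.2)
      let body := if total % 2 ≠ 0 then String.ofList s.toList.reverse else s
      PySem.Str.join "" left ++ body ++ PySem.Str.join "" right
    | _ => ""  -- Python raises ValueError (unpacking needs ≥ 2 lines); excluded by Pre_solve

-- ===== PRECONDITION & SPEC =====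
-- a query line Python's loop accepts without a ValueError, carrying a valid query type
def wfLine (q : String) : Bool :=
  q == "1" ||
    (match PySem.Str.split₀ q with
     | [_, f, _] => f == "1" || f == "2"
     | _ => false)

-- Pre_ excludes (a) inputs on which A raises ValueError (fewer than two lines, or a query line that
-- is neither "1" nor three whitespace-separated tokens) and (b) query lines whose middle token is
-- neither "1" nor "2": such lines are malformed queries, and where the two programs place that
-- character (A: by its pre/post condition falling through; B: by the remaining-flip parity) is an
-- accidental, equally defensible choice.
def Pre_solve (string : String) : Prop :=
  2 ≤ ((PySem.Str.split? string "\n").getD []).length ∧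
  ∀ q ∈ ((PySem.Str.split? string "\n").getD []).drop 2, wfLine q = true

instance (string : String) : Decidable (Pre_solve string) := by unfold Pre_solve; infer_instance

def pvWitness_solve : String := "ab\n2\n1\n2 1 x"

def Spec_solve (string : String) (out : String) : Prop := out = solve_alt string
instance (string : String) (out : String) : Decidable (Spec_solve string out) := by unfold Spec_solve; infer_instance

-- ===== CLAIM (what is proved, stated in full; the proofs are below) =====
def Claim_equal_solve : Prop := ∀ (string : String), Dom_solve string → Pre_solve string → Spec_solve string (solve string)

-- ===== LEMMAS AND PROOFS =====

-- number of flip queries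
def cnt (qs : List String) : Nat := qs.countP (fun line => line == "1")

-- the tagged list of inserted characters, tagged with the final side they end up on
def Tg : List String → List (Bool × String)
  | [] => []
  | q :: rest =>
    if q = "1" then Tg rest
    else
      match PySem.Str.split₀ q with
      | [_, f, c] => ((f == "1") == decide ((cnt rest : Int) % 2 = 0), c) :: Tg rest
      | _ => Tg rest

lemma cnt_cons (q : String) (rest : List String) :
    cnt (q :: rest) = (if q == "1" then 1 else 0) + cnt rest := by
  simp only [cnt, List.countP_cons]
  cases h : (q == "1") <;> simp [h] <;> omega

-- B's fold produces the tagged list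
lemma b_tag (qs : List String) (total : Int) (tg : List (Bool × String)) (seen : Int)
    (h : total - seen = (cnt qs : Int)) :
    (qs.foldl (btag total) (tg, seen)).1 = tg ++ Tg qs := by
  induction qs generalizing tg seen with
  | nil => simp [Tg]
  | cons q rest ih =>
    rw [cnt_cons] at h
    by_cases hq : q = "1"
    · have hb : (q == "1") = true := by simpa using hq
      rw [hb] at h; simp only [if_pos rfl] at h
      simp only [List.foldl_cons, btag, if_pos hq, Tg, hq, if_pos rfl]
      exact ih tg (seen + 1) (by push_cast at h ⊢; omega)
    · have hb : (q == "1") = false := by simpa using hq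
      rw [hb] at h
      have hs : total - seen = (cnt rest : Int) := by
        push_cast at h ⊢; omega
      simp only [List.foldl_cons, btag, if_neg hq]
      cases hsp : PySem.Str.split₀ q with
      | nil => simp [Tg, if_neg hq, hsp]; exact ih tg seen hs
      | cons a l1 =>
        cases l1 with
        | nil => simp [Tg, if_neg hq, hsp]; exact ih tg seen hs
        | cons f l2 =>
          cases l2 with
          | nil => simp [Tg, if_neg hq, hsp]; exact ih tg seen hs
          | cons c l3 =>
            cases l3 with
            | nil =>
              have hcond : ((f == "1") == decide ((total - seen) % 2 = 0))
                   = ((f == "1") == decide (((cnt rest : Int)) % 2 = 0)) := by rw [hs]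
              simp only [Tg, if_neg hq, hsp, hcond]
              rw [ih (tg ++ [((f == "1") == decide (((cnt rest : Int)) % 2 = 0), c)]) seen hs]
              simp
            | cons x l4 => simp [Tg, if_neg hq, hsp]; exact ih tg seen hs

-- A's backward fold, characterised by the tagged list (for well-formed query lines)
lemma a_fold (qs : List String) (hwf : ∀ q ∈ qs, wfLine q = true) :
    qs.reverse.foldl astep ([], [], false)
    = ((((Tg qs).filter (fun p => p.1)).map (fun p => p.2)).reverse,
       (((Tg qs).filter (fun p => !p.1)).map (fun p => p.2)).reverse,
       decide ((cnt qs : Int) % 2 = 1)) := by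
  induction qs with
  | nil => simp [Tg, cnt]
  | cons q rest ih =>
    have hq := hwf q (List.mem_cons_self ..)
    have hrest : ∀ p ∈ rest, wfLine p = true := fun p hp => hwf p (List.mem_cons_of_mem _ hp)
    have hfold : (q :: rest).reverse.foldl astep ([], [], false)
        = astep (rest.reverse.foldl astep ([], [], false)) q := by
      rw [List.reverse_cons, List.foldl_append]; rfl
    rw [hfold, ih hrest, cnt_cons]
    by_cases hq1 : q = "1"
    · subst hq1
      have hp : (!decide ((cnt rest : Int) % 2 = 1)) = decide (((1 + cnt rest : Nat) : Int) % 2 = 1) := by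
        push_cast
        rcases Int.emod_two_eq_zero_or_one (cnt rest : Int) with h | h <;> simp [h] <;> omega
      simp [astep, Tg, hp]
    · have hb : (q == "1") = false := by simpa using hq1
      have hsh : ∃ a f c, PySem.Str.split₀ q = [a, f, c] ∧ (f = "1" ∨ f = "2") := by
        unfold wfLine at hq
        have hq1' : (q == "1") = false := by simpa using hq1
        rw [hq1'] at hq
        simp only [Bool.false_or] at hq
        rcases hsp : PySem.Str.split₀ q with _ | ⟨a, _ | ⟨f, _ | ⟨c, _ | ⟨x, l4⟩⟩⟩⟩ <;>
          rw [hsp] at hq <;> simp at hq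
        exact ⟨a, f, c, rfl, by tauto⟩
      obtain ⟨a, f, c, hsp, hf⟩ := hsh
      simp only [astep, if_neg hq1, hsp, Tg, hb, if_pos rfl]
      rcases hf with hf | hf <;> subst hf <;>
        rcases Int.emod_two_eq_zero_or_one (cnt rest : Int) with h | h <;>
        simp [h] <;> omega

-- ===== VERDICT (by name: the statement is the Claim_ definition above) =====
theorem solve_spec : Claim_equal_solve := by
  intro string _hdom hpre
  unfold Spec_solve
  obtain ⟨hlen, hwf⟩ := hpre
  cases hsp : PySem.Str.split? string "\n" with
  | none => simp [solve, solve_alt, hsp]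
  | some parts =>
    rw [hsp] at hlen hwf
    match parts, hlen, hwf with
    | s :: q :: qs, hlen, hwf =>
      simp only [Option.getD_some, List.drop_succ_cons, List.drop_zero] at hwf
      have hTg : ((qs.foldl (btag ((cnt qs : Nat) : Int)) ([], 0)).1) = Tg qs := by
        have := b_tag qs ((cnt qs : Nat) : Int) [] 0 (by omega)
        simpa using this
      have hA := a_fold qs hwf
      have hrev : ((Tg qs).reverse.filter (fun p => p.1)).map (fun p => p.2)
          = (((Tg qs).filter (fun p => p.1)).map (fun p => p.2)).reverse := by
        rw [List.filter_reverse, List.map_reverse]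
      have hc : (qs.countP (fun line => line == "1")) = cnt qs := rfl
      simp only [solve, solve_alt, hsp, hc]
      rw [hA]
      simp only [hTg, hrev]
      rcases Int.emod_two_eq_zero_or_one ((cnt qs : Nat) : Int) with h | h <;> simp [h]
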